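-- pv_equiv track=rewrite | github.com/ctestagrose/LLMTB | Scripts/src/Utils/Trainer.py | oversample_minority_class
-- ===== SOURCE A (Python) =====
-- def oversample_minority_class(dataset):
--     majority_samples = [sample for sample in dataset if sample[1] == 0]
--     minority_samples = [sample for sample in dataset if sample[1] == 1]
--
--     majority_count = len(majority_samples)
--     minority_count = len(minority_samples)
--     duplication_factor = majority_count // minority_count
--
--     oversampled_minority_samples = minority_samples * duplication_factor
--     remaining = majority_count - len(oversampled_minority_samples)
--     oversampled_minority_samples += minority_samples[:remaining]
--
--     oversampled_dataset = majority_samples + oversampled_minority_samples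
--     return oversampled_dataset
-- ===== SOURCE B (Python) =====
-- def oversample_minority_class(dataset):
--     majority = []
--     minority = []
--     for sample in dataset:
--         if sample[1] == 0:
--             majority.append(sample)
--         elif sample[1] == 1:
--             minority.append(sample)
--     out = list(majority)
--     j = 0
--     for _ in range(len(majority)):
--         out.append(minority[j])
--         j = (j + 1) % len(minority)
--     return out
-- ===== Notes on version B (the rewrite author's own statement) =====
-- stated objective: alternative
-- what changed: Replaces A's two filter passes plus multiply-by-duplication-factor-and-slice construction with a single partitioning pass over the dataset and a cyclic-pointer append loop (no list multiplication, no slicing, no precomputed duplication factor).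
-- outside the precondition, e.g. on oversample_minority_class([]): A raises ZeroDivisionError, B returns []; on oversample_minority_class([(5, 2)]): A raises ZeroDivisionError, B returns []
-- crash fix: On datasets where both classes are empty (no 0- or 1-labelled sample) A raises ZeroDivisionError from 0 // 0, while B's empty loop skips the minority lookup and returns []. — e.g. on oversample_minority_class([(5, 2)]): A raises ZeroDivisionError, B returns []
import Mathlib
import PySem

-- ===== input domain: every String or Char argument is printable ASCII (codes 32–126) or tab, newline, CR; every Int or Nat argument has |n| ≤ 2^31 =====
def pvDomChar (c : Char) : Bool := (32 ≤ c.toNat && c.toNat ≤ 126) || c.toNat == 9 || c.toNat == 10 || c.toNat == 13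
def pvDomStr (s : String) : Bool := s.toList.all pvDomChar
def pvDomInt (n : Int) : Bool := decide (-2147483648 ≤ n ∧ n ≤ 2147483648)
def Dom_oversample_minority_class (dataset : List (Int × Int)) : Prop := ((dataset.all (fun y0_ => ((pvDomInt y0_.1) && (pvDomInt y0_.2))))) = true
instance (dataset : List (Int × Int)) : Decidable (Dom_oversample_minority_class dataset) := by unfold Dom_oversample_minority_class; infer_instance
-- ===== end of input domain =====

-- B replaces the two filter passes and the 'minority * (maj//min) + slice' padding by one
-- partitioning pass and a cyclic-pointer append loop; same return value (alternative, not faster).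

-- ===== PORT A =====
def oversample_minority_class (dataset : List (Int × Int)) : List (Int × Int) :=
  let majority_samples := dataset.filter (fun sample => sample.2 == 0)
  let minority_samples := dataset.filter (fun sample => sample.2 == 1)
  let majority_count : Int := majority_samples.length
  let minority_count : Int := minority_samples.length
  -- Pre_ guarantees minority_count ≠ 0 (Python raises ZeroDivisionError otherwise)
  let duplication_factor := PySem.Int.floordiv majority_count minority_count
  -- Python 'list * k' (k here is ≥ 0; negative k would give [], as toNat does)
  let oversampled := (List.replicate duplication_factor.toNat minority_samples).flatten
  let remaining : Int := majority_count - oversampled.length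
  let oversampled := oversampled ++ PySem.List.slice minority_samples none (some remaining)
  majority_samples ++ oversampled

-- ===== PORT B =====
-- the counted for-loop of B: n iterations left, j the cyclic pointer into minority
-- (j is always in range under Pre_, so pyGetD's default is never used)
def pvPadCycle (minority : List (Int × Int)) : Nat → Int → List (Int × Int)
  | 0, _ => []
  | n + 1, j =>
    PySem.List.pyGetD minority j (0, 0) ::
      pvPadCycle minority n (PySem.Int.mod (j + 1) (minority.length : Int))

def oversample_minority_class_alt (dataset : List (Int × Int)) : List (Int × Int) :=
  -- single pass: partition into majority/minority with appends (elif: other labels dropped)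
  let p := dataset.foldl
    (fun acc sample =>
      if sample.2 == 0 then (acc.1 ++ [sample], acc.2)
      else if sample.2 == 1 then (acc.1, acc.2 ++ [sample])
      else acc)
    ([], [])
  let majority := p.1
  let minority := p.2
  -- Pre_ guarantees minority ≠ []; Python B raises there (IndexError / ZeroDivisionError)
  majority ++ pvPadCycle minority majority.length 0

-- ===== PRECONDITION & SPEC =====
-- Pre_ excludes exactly the datasets with no 1-labelled sample, on which Python A raises ZeroDivisionError.
def Pre_oversample_minority_class (dataset : List (Int × Int)) : Prop :=
  (dataset.any (fun sample => sample.2 == 1)) = true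
instance (dataset : List (Int × Int)) : Decidable (Pre_oversample_minority_class dataset) := by
  unfold Pre_oversample_minority_class; infer_instance
def pvWitness_oversample_minority_class : (List (Int × Int)) := [(3, 0), (7, 0), (5, 1)]

-- On datasets with both classes empty (no 0- or 1-labelled sample), A raises
-- ZeroDivisionError from 0 // 0 while B's empty loop returns [].
def Raises_oversample_minority_class (dataset : List (Int × Int)) : Prop :=
  (dataset.all (fun sample => !(sample.2 == 0) && !(sample.2 == 1))) = true
instance (dataset : List (Int × Int)) : Decidable (Raises_oversample_minority_class dataset) := by
  unfold Raises_oversample_minority_class; infer_instance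
def pvRaiseWitness_oversample_minority_class : (List (Int × Int)) := [(5, 2)]
def pvRaiseWitnessOut_oversample_minority_class : List (Int × Int) := []

def Spec_oversample_minority_class (dataset : List (Int × Int)) (out : List (Int × Int)) : Prop := out = oversample_minority_class_alt dataset
instance (dataset : List (Int × Int)) (out : List (Int × Int)) : Decidable (Spec_oversample_minority_class dataset out) := by unfold Spec_oversample_minority_class; infer_instance

-- ===== CLAIM (what is proved, stated in full; the proofs are below) =====
def Claim_equal_oversample_minority_class : Prop := ∀ (dataset : List (Int × Int)), Dom_oversample_minority_class dataset → Pre_oversample_minority_class dataset → Spec_oversample_minority_class dataset (oversample_minority_class dataset)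
def Claim_raises_oversample_minority_class : Prop := (∀ (dataset : List (Int × Int)), Dom_oversample_minority_class dataset → Raises_oversample_minority_class dataset → ¬ Pre_oversample_minority_class dataset) ∧ (Dom_oversample_minority_class (pvRaiseWitness_oversample_minority_class) ∧ Raises_oversample_minority_class (pvRaiseWitness_oversample_minority_class) ∧ oversample_minority_class_alt (pvRaiseWitness_oversample_minority_class) = pvRaiseWitnessOut_oversample_minority_class)

-- ===== LEMMAS AND PROOFS =====

-- B's single partitioning pass equals A's two filter passes.
lemma partition_foldl (dataset : List (Int × Int)) (m n : List (Int × Int)) :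
    dataset.foldl
      (fun acc sample =>
        if sample.2 == 0 then (acc.1 ++ [sample], acc.2)
        else if sample.2 == 1 then (acc.1, acc.2 ++ [sample])
        else acc)
      (m, n)
    = (m ++ dataset.filter (fun sample => sample.2 == 0),
       n ++ dataset.filter (fun sample => sample.2 == 1)) := by
  induction dataset generalizing m n with
  | nil => simp
  | cons x xs ih =>
    rw [List.foldl_cons]
    split_ifs with h0 h1
    · rw [ih]; simp only [beq_iff_eq] at h0
      simp [h0]
    · rw [ih]; simp only [beq_iff_eq] at h1
      simp [h1]
    · rw [ih]; simp only [beq_iff_eq] at h0 h1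
      simp [h0, h1]

-- B's cyclic-pointer loop equals modular indexing.
lemma pvPadCycle_eq_mod (l : List (Int × Int)) (hN : 0 < l.length) (M : Nat) :
    ∀ (j : Nat), j < l.length →
      pvPadCycle l M (j : Int)
        = (List.range M).map (fun k => l.getD ((j + k) % l.length) (0, 0)) := by
  induction M with
  | zero => intro j _; simp [pvPadCycle]
  | succ M ih =>
    intro j hj
    have hstep : PySem.Int.mod ((j : Int) + 1) (l.length : Int)
        = (((j + 1) % l.length : Nat) : Int) := by
      have hc : ((j : Int) + 1) = (((j + 1 : Nat)) : Int) := by push_cast; ring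
      rw [hc, PySem.Int.mod_natCast]
    rw [pvPadCycle, hstep, ih ((j + 1) % l.length) (Nat.mod_lt _ hN)]
    rw [List.range_succ_eq_map, List.map_cons, List.map_map]
    congr 1
    · rw [PySem.List.pyGetD_natCast]
      rw [Nat.add_zero, Nat.mod_eq_of_lt hj]
    · apply List.map_congr_left
      intro k _
      simp only [Function.comp_apply]
      rw [Nat.mod_add_mod]
      congr 2
      omega

-- A's 'q full copies then a partial prefix' equals modular indexing.
lemma cyclic_pad (l : List (Int × Int)) (hN : 0 < l.length) (M : Nat) :
    (List.replicate (M / l.length) l).flatten ++ l.take (M % l.length)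
      = (List.range M).map (fun k => l.getD (k % l.length) (0, 0)) := by
  induction M with
  | zero => simp [Nat.zero_mod, Nat.zero_div]
  | succ M ih =>
    rw [List.range_succ, List.map_append, ← ih]
    have hlt : M % l.length < l.length := Nat.mod_lt _ hN
    by_cases h : M % l.length + 1 = l.length
    · have hdm := Nat.div_add_mod M l.length
      have hsum : M + 1 = l.length * (M / l.length + 1) := by
        rw [Nat.mul_add, Nat.mul_one]; omega
      have hdiv : (M + 1) / l.length = M / l.length + 1 := by
        rw [hsum, Nat.mul_div_cancel_left _ hN]
      have hmod : (M + 1) % l.length = 0 := by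
        rw [hsum, Nat.mul_mod_right]
      rw [hdiv, hmod, List.take_zero, List.replicate_succ', List.flatten_append,
          List.flatten_cons, List.flatten_nil, List.append_nil, List.append_assoc]
      congr 1
      rw [List.map_singleton, List.getD_eq_getElem _ _ hlt,
          ← List.take_succ_eq_append_getElem hlt, h, List.take_length, List.append_nil]
    · have hdm := Nat.div_add_mod M l.length
      have hsum : M + 1 = l.length * (M / l.length) + (M % l.length + 1) := by omega
      have hlt' : M % l.length + 1 < l.length := by omega
      have hdiv : (M + 1) / l.length = M / l.length := by
        rw [hsum, Nat.mul_add_div hN, Nat.div_eq_of_lt hlt']; omega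
      have hmod : (M + 1) % l.length = M % l.length + 1 := by
        rw [hsum, Nat.mul_add_mod, Nat.mod_eq_of_lt hlt']
      rw [hdiv, hmod, List.take_succ_eq_append_getElem hlt, List.map_singleton,
          List.getD_eq_getElem _ _ hlt, List.append_assoc]

lemma filter_ne_nil_of_any (dataset : List (Int × Int))
    (h : (dataset.any (fun sample => sample.2 == 1)) = true) :
    dataset.filter (fun sample => sample.2 == 1) ≠ [] := by
  intro hnil
  rw [List.any_eq_true] at h
  obtain ⟨x, hx, hx1⟩ := h
  have : x ∈ dataset.filter (fun sample => sample.2 == 1) :=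
    List.mem_filter.mpr ⟨hx, hx1⟩
  simp [hnil] at this

-- ===== VERDICT (by name: the statement is the Claim_ definition above) =====
theorem oversample_minority_class_spec : Claim_equal_oversample_minority_class := by
  unfold Claim_equal_oversample_minority_class
  intro dataset _ hpre
  unfold Spec_oversample_minority_class oversample_minority_class oversample_minority_class_alt
  simp only [partition_foldl dataset [] [], List.nil_append]
  set maj := dataset.filter (fun sample => sample.2 == 0) with hmaj
  set mino := dataset.filter (fun sample => sample.2 == 1) with hmino
  have hne : mino ≠ [] := filter_ne_nil_of_any dataset hpre
  have hN : 0 < mino.length := List.length_pos_iff.mpr hne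
  set M := maj.length with hM
  set N := mino.length with hNdef
  congr 1
  -- A side: cast to Nat arithmetic, reduce to modular indexing
  have hflen : ((List.replicate (M / N) mino).flatten).length = (M / N) * N := by
    rw [List.length_flatten, List.map_replicate, List.sum_replicate, smul_eq_mul]
  have hrem : (M : Int) - (((List.replicate ((PySem.Int.floordiv (M : Int) (N : Int)).toNat) mino).flatten).length : Int)
      = ((M % N : Nat) : Int) := by
    rw [PySem.Int.floordiv_natCast]
    have htn0 : ((M / N : Nat) : Int).toNat = M / N := Int.toNat_natCast _
    rw [htn0, hflen]
    have h2 : (N : Int) * ((M / N : Nat) : Int) + ((M % N : Nat) : Int) = (M : Int) := by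
      exact_mod_cast Nat.div_add_mod M N
    push_cast at h2 ⊢
    linarith
  rw [hrem, PySem.List.slice_to_natCast, PySem.Int.floordiv_natCast, Int.toNat_natCast,
      cyclic_pad mino hN M]
  -- B side: the cyclic pointer starting at 0 is modular indexing
  have h0 : ((0 : Nat) : Int) = (0 : Int) := rfl
  rw [← h0, pvPadCycle_eq_mod mino hN M 0 hN]
  simp

@[simp] theorem oversample_minority_class_raises : Claim_raises_oversample_minority_class := by
  unfold Claim_raises_oversample_minority_class
  constructor
  · intro dataset _ hall hpre
    unfold Raises_oversample_minority_class at hall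
    unfold Pre_oversample_minority_class at hpre
    rw [List.any_eq_true] at hpre
    obtain ⟨x, hx, hx1⟩ := hpre
    rw [List.all_eq_true] at hall
    have := hall x hx
    simp at this hx1
    exact this.2 hx1
  · exact ⟨by decide, by decide, by decide⟩
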